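-- pv_equiv track=rewrite | github.com/hjg727/coding-test | 프로그래머스/2/87946. 피로도/피로도.py | solution
-- ===== SOURCE A (Python) =====
-- import itertools
--
-- def solution(k, dungeons):
--     answer = -1
--     for i in itertools.permutations(dungeons):
--         tmp = 0
--         current = k
--         for x, y in i:
--             if current >= x:
--                 current -= y
--                 tmp += 1
--
--         answer = max(answer, tmp)
--
--     return answer
-- ===== SOURCE B (Python) =====
-- def solution(k, dungeons):
--     def best(fatigue, ds):
--         r = 0
--         for i in range(len(ds)):
--             x, y = ds[i]
--             if fatigue >= x:
--                 r = max(r, 1 + best(fatigue - y, ds[:i] + ds[i+1:]))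
--         return r
--     return best(k, dungeons)
-- ===== Notes on version B (the rewrite author's own statement) =====
-- stated objective: alternative
-- what changed: Replaced A's full enumeration of all n! permutations, each simulated greedily with skips, by a backtracking DFS that recursively branches only on currently affordable next dungeons.
import Mathlib
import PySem

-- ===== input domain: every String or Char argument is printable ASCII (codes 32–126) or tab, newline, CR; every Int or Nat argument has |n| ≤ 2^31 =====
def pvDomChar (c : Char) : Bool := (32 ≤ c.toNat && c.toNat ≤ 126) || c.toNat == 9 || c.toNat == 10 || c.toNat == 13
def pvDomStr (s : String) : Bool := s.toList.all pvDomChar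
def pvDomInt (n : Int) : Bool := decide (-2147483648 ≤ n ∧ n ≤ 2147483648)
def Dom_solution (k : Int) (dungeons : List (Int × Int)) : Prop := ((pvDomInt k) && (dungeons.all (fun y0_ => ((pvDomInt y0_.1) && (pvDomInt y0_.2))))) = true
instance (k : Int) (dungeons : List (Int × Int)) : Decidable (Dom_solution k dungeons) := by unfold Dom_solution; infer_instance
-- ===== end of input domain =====

-- B replaces A's enumeration of all n! permutations (each simulated greedily with skips)
-- by a backtracking DFS that only branches on currently affordable dungeons.

-- ===== PORT A =====
-- itertools.permutations ported as List.permutations (the result is a max over all orders)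
def solution (k : Int) (dungeons : List (Int × Int)) : Int :=
  dungeons.permutations.foldl
    (fun answer p =>
      max answer (p.foldl (fun tc xy => if tc.2 ≥ xy.1 then (tc.1 + 1, tc.2 - xy.2) else tc)
        ((0 : Int), k)).1)
    (-1)

-- ===== PORT B =====
-- (ds[i], ds[:i] + ds[i+1:]) for i in range(len ds), in order
def selections {α : Type} : List α → List (α × List α)
  | [] => []
  | a :: xs => (a, xs) :: (selections xs).map (fun br => (br.1, a :: br.2))

-- needed by best's termination proof
theorem selections_len {α : Type} {a : α} {rest : List α} :
    ∀ {xs : List α}, (a, rest) ∈ selections xs → rest.length + 1 = xs.length := by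
  intro xs
  induction xs generalizing a rest with
  | nil => intro h; simp [selections] at h
  | cons b xs ih =>
    intro h
    simp only [selections, List.mem_cons, List.mem_map] at h
    rcases h with h | ⟨br, hbr, heq⟩
    · cases h; simp
    · injection heq with h1 h2
      subst h1
      rw [← h2]
      have := ih (show (br.1, br.2) ∈ selections xs by simpa using hbr)
      simpa using this

def best (k : Int) (ds : List (Int × Int)) : Int :=
  (selections ds).attach.foldl
    (fun r s => if k ≥ s.1.1.1 then max r (1 + best (k - s.1.1.2) s.1.2) else r) 0
termination_by ds.length
decreasing_by
  have h := selections_len (show (s.1.1, s.1.2) ∈ selections ds by simpa using s.2)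
  omega

def solution_alt (k : Int) (dungeons : List (Int × Int)) : Int :=
  best k dungeons

-- ===== PRECONDITION & SPEC =====
def Spec_solution (k : Int) (dungeons : List (Int × Int)) (out : Int) : Prop := out = solution_alt k dungeons
instance (k : Int) (dungeons : List (Int × Int)) (out : Int) : Decidable (Spec_solution k dungeons out) := by unfold Spec_solution; infer_instance

-- ===== CLAIM (what is proved, stated in full; the proofs are below) =====
def Claim_equal_solution : Prop := ∀ (k : Int) (dungeons : List (Int × Int)), Dom_solution k dungeons → Spec_solution k dungeons (solution k dungeons)

-- ===== LEMMAS AND PROOFS =====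

-- lemmas about the fold  foldl (fun r e => if P e then max r (v e) else r) init l
theorem foldl_maxif_init_le {α : Type} (P : α → Prop) [DecidablePred P] (v : α → Int) :
    ∀ (l : List α) (init : Int),
      init ≤ l.foldl (fun r e => if P e then max r (v e) else r) init := by
  intro l
  induction l with
  | nil => simp
  | cons e t ih =>
    intro init
    refine le_trans ?_ (ih (if P e then max init (v e) else init))
    split <;> simp

theorem foldl_maxif_le_of_mem {α : Type} (P : α → Prop) [DecidablePred P] (v : α → Int) :
    ∀ (l : List α) (init : Int) (e : α), e ∈ l → P e →
      v e ≤ l.foldl (fun r x => if P x then max r (v x) else r) init := by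
  intro l
  induction l with
  | nil => simp
  | cons a t ih =>
    intro init e he hP
    rcases List.mem_cons.1 he with rfl | he
    · refine le_trans ?_ (foldl_maxif_init_le P v t _)
      simp [hP]
    · exact ih _ e he hP

theorem foldl_maxif_cases {α : Type} (P : α → Prop) [DecidablePred P] (v : α → Int) :
    ∀ (l : List α) (init : Int),
      l.foldl (fun r x => if P x then max r (v x) else r) init = init ∨
      ∃ e ∈ l, P e ∧
        l.foldl (fun r x => if P x then max r (v x) else r) init = v e := by
  intro l
  induction l with
  | nil => intro init; left; rfl
  | cons a t ih =>
    intro init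
    have step : List.foldl (fun r x => if P x then max r (v x) else r) init (a :: t)
        = List.foldl (fun r x => if P x then max r (v x) else r)
            (if P a then max init (v a) else init) t := rfl
    rcases ih (if P a then max init (v a) else init) with h | ⟨e, he, hP, h⟩
    · by_cases hPa : P a
      · rcases max_choice init (v a) with hm | hm
        · left; rw [step, h, if_pos hPa, hm]
        · right; exact ⟨a, List.mem_cons_self .., hPa, by rw [step, h, if_pos hPa, hm]⟩
      · left; rw [step, h, if_neg hPa]
    · right; exact ⟨e, List.mem_cons_of_mem _ he, hP, by rw [step, h]⟩

-- the same trio for the plain max-fold of A's outer loop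
theorem foldl_max_init_le {α : Type} (v : α → Int) :
    ∀ (l : List α) (init : Int), init ≤ l.foldl (fun r e => max r (v e)) init := by
  intro l
  induction l with
  | nil => simp
  | cons e t ih => intro init; exact le_trans (le_max_left _ _) (ih (max init (v e)))

theorem foldl_max_le_of_mem {α : Type} (v : α → Int) :
    ∀ (l : List α) (init : Int) (e : α), e ∈ l →
      v e ≤ l.foldl (fun r x => max r (v x)) init := by
  intro l
  induction l with
  | nil => simp
  | cons a t ih =>
    intro init e he
    rcases List.mem_cons.1 he with rfl | he
    · exact le_trans (le_max_right _ _) (foldl_max_init_le v t _)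
    · exact ih _ e he

theorem foldl_max_cases {α : Type} (v : α → Int) :
    ∀ (l : List α) (init : Int),
      l.foldl (fun r x => max r (v x)) init = init ∨
      ∃ e ∈ l, l.foldl (fun r x => max r (v x)) init = v e := by
  intro l
  induction l with
  | nil => intro init; left; rfl
  | cons a t ih =>
    intro init
    have step : List.foldl (fun r x => max r (v x)) init (a :: t)
        = List.foldl (fun r x => max r (v x)) (max init (v a)) t := rfl
    rcases ih (max init (v a)) with h | ⟨e, he, h⟩
    · rcases max_choice init (v a) with hm | hm
      · left; rw [step, h, hm]
      · right; exact ⟨a, List.mem_cons_self .., by rw [step, h, hm]⟩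
    · right; exact ⟨e, List.mem_cons_of_mem _ he, by rw [step, h]⟩

-- selections: each selection is the list with one element pulled to the front
theorem selections_perm {α : Type} {a : α} {rest : List α} :
    ∀ {xs : List α}, (a, rest) ∈ selections xs → List.Perm (a :: rest) xs := by
  intro xs
  induction xs generalizing a rest with
  | nil => intro h; simp [selections] at h
  | cons b xs ih =>
    intro h
    simp only [selections, List.mem_cons, List.mem_map] at h
    rcases h with h | ⟨br, hbr, heq⟩
    · cases h; exact List.Perm.refl _
    · injection heq with h1 h2
      subst h2
      have hp := ih (show (br.1, br.2) ∈ selections xs by simpa using hbr)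
      rw [← h1]
      exact (List.Perm.swap b br.1 br.2).trans (List.Perm.cons b hp)

theorem selections_mem_of_mem {α : Type} {a : α} :
    ∀ {xs : List α}, a ∈ xs → ∃ rest, (a, rest) ∈ selections xs := by
  intro xs
  induction xs with
  | nil => intro h; simp at h
  | cons b xs ih =>
    intro h
    rcases List.mem_cons.1 h with rfl | h
    · exact ⟨xs, by simp [selections]⟩
    · obtain ⟨rest, hr⟩ := ih h
      refine ⟨b :: rest, ?_⟩
      simp only [selections, List.mem_cons, List.mem_map]
      exact Or.inr ⟨(a, rest), hr, rfl⟩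

-- best unfolded to a plain foldl over selections
theorem best_eq (k : Int) (ds : List (Int × Int)) :
    best k ds = (selections ds).foldl
      (fun r s => if k ≥ s.1.1 then max r (1 + best (k - s.1.2) s.2) else r) 0 := by
  rw [best]
  exact List.foldl_attach (l := selections ds)
    (f := fun r (s : (Int × Int) × List (Int × Int)) =>
      if k ≥ s.1.1 then max r (1 + best (k - s.1.2) s.2) else r) (b := 0)

theorem best_nonneg (k : Int) (ds : List (Int × Int)) : 0 ≤ best k ds := by
  rw [best_eq k ds]
  exact foldl_maxif_init_le (fun s : (Int × Int) × List (Int × Int) => k ≥ s.1.1)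
    (fun s => 1 + best (k - s.1.2) s.2) (selections ds) 0

theorem best_cand {k : Int} {ds : List (Int × Int)} {a : Int × Int} {rest : List (Int × Int)}
    (h : (a, rest) ∈ selections ds) (hk : k ≥ a.1) :
    1 + best (k - a.2) rest ≤ best k ds := by
  rw [best_eq k ds]
  exact foldl_maxif_le_of_mem (fun s : (Int × Int) × List (Int × Int) => k ≥ s.1.1)
    (fun s => 1 + best (k - s.1.2) s.2) (selections ds) 0 (a, rest) h hk

theorem best_cases (k : Int) (ds : List (Int × Int)) :
    best k ds = 0 ∨ ∃ a rest, (a, rest) ∈ selections ds ∧ k ≥ a.1 ∧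
      best k ds = 1 + best (k - a.2) rest := by
  rw [best_eq k ds]
  rcases foldl_maxif_cases (fun s : (Int × Int) × List (Int × Int) => k ≥ s.1.1)
    (fun s => 1 + best (k - s.1.2) s.2) (selections ds) 0 with h | ⟨e, he, hP, h⟩
  · left; exact h
  · right; exact ⟨e.1, e.2, by simpa using he, hP, h⟩

-- greedy count of A's inner loop, as a recursive function
def gcount (k : Int) : List (Int × Int) → Int
  | [] => 0
  | (x, y) :: p => if k ≥ x then 1 + gcount (k - y) p else gcount k p

theorem gcount_nonneg (p : List (Int × Int)) : ∀ k, 0 ≤ gcount k p := by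
  induction p with
  | nil => intro k; simp [gcount]
  | cons a p ih =>
    intro k
    obtain ⟨x, y⟩ := a
    simp only [gcount]
    split
    · have := ih (k - y); omega
    · exact ih k

theorem gfold (p : List (Int × Int)) : ∀ (t k : Int),
    (p.foldl (fun tc xy => if tc.2 ≥ xy.1 then (tc.1 + 1, tc.2 - xy.2) else tc) (t, k)).1
      = t + gcount k p := by
  induction p with
  | nil => intro t k; simp [gcount]
  | cons a p ih =>
    intro t k
    obtain ⟨x, y⟩ := a
    simp only [List.foldl_cons, gcount]
    by_cases h : k ≥ x
    · rw [if_pos h, if_pos h, ih]; ring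
    · rw [if_neg h, if_neg h, ih]

theorem best_nil (k : Int) : best k ([] : List (Int × Int)) = 0 := by
  rw [best_eq]; simp [selections]

-- monotonicity: removing one element cannot increase best
theorem best_mono : ∀ (n : Nat) (rest : List (Int × Int)), rest.length ≤ n →
    ∀ (xs : List (Int × Int)) (a : Int × Int) (k : Int),
      List.Perm (a :: rest) xs → best k rest ≤ best k xs := by
  intro n
  induction n with
  | zero =>
    intro rest hlen xs a k _
    have : rest = [] := List.length_eq_zero_iff.1 (Nat.le_zero.1 hlen)
    subst this
    rw [best_nil]
    exact best_nonneg k xs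
  | succ n ih =>
    intro rest hlen xs a k hperm
    rcases best_cases k rest with h | ⟨b, rest', hsel, hk, h⟩
    · rw [h]; exact best_nonneg k xs
    · have hb : b ∈ xs := hperm.mem_iff.1 (List.mem_cons_of_mem _
        ((selections_perm hsel).mem_iff.1 (List.mem_cons_self ..)))
      obtain ⟨rest'', hsel''⟩ := selections_mem_of_mem hb
      have hperm'' : List.Perm (b :: rest'') xs := selections_perm hsel''
      have hperm' : List.Perm (b :: rest') rest := selections_perm hsel
      have hra : List.Perm rest'' (a :: rest') := by
        have h1 : List.Perm (b :: rest'') (b :: a :: rest') :=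
          (hperm''.trans hperm.symm).trans
            ((List.Perm.cons a hperm'.symm).trans (List.Perm.swap b a rest'))
        exact h1.cons_inv
      have hlen' : rest'.length ≤ n := by
        have := selections_len hsel; omega
      have hih := ih rest' hlen' rest'' a (k - b.2) hra.symm
      have hc := best_cand hsel'' hk
      omega

-- upper bound: every permutation's greedy count is at most best
theorem gcount_le_best : ∀ (n : Nat) (p : List (Int × Int)), p.length ≤ n →
    ∀ (k : Int) (xs : List (Int × Int)), List.Perm p xs → gcount k p ≤ best k xs := by
  intro n
  induction n with
  | zero =>
    intro p hlen k xs hperm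
    have : p = [] := List.length_eq_zero_iff.1 (Nat.le_zero.1 hlen)
    subst this
    simpa [gcount] using best_nonneg k xs
  | succ n ih =>
    intro p hlen k xs hperm
    rcases p with _ | ⟨⟨x, y⟩, p'⟩
    · simpa [gcount] using best_nonneg k xs
    · have hmem : (x, y) ∈ xs := hperm.mem_iff.1 (List.mem_cons_self ..)
      obtain ⟨rest, hsel⟩ := selections_mem_of_mem hmem
      have hxr : List.Perm ((x, y) :: rest) xs := selections_perm hsel
      have hp' : List.Perm p' rest := (hperm.trans hxr.symm).cons_inv
      have hlen' : p'.length ≤ n := by simp at hlen; omega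
      by_cases hk : k ≥ x
      · have hih := ih p' hlen' (k - y) rest hp'
        have hc : 1 + best (k - y) rest ≤ best k xs := best_cand hsel hk
        simp only [gcount, if_pos hk]
        omega
      · have h1 := ih p' hlen' k rest hp'
        have h2 := best_mono rest.length rest le_rfl xs (x, y) k hxr
        simp only [gcount, if_neg hk]
        omega

-- lower bound: some permutation achieves best
theorem exists_perm_best : ∀ (n : Nat) (xs : List (Int × Int)), xs.length ≤ n →
    ∀ (k : Int), ∃ p, List.Perm p xs ∧ best k xs ≤ gcount k p := by
  intro n
  induction n with
  | zero =>
    intro xs hlen k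
    have : xs = [] := List.length_eq_zero_iff.1 (Nat.le_zero.1 hlen)
    subst this
    exact ⟨[], List.Perm.refl _, by simp [best_nil, gcount]⟩
  | succ n ih =>
    intro xs hlen k
    rcases best_cases k xs with h | ⟨a, rest, hsel, hk, h⟩
    · exact ⟨xs, List.Perm.refl _, by rw [h]; exact gcount_nonneg xs k⟩
    · have hlen' : rest.length ≤ n := by have := selections_len hsel; omega
      obtain ⟨p', hp', hle⟩ := ih rest hlen' (k - a.2)
      refine ⟨a :: p', (List.Perm.cons _ hp').trans (selections_perm hsel), ?_⟩
      obtain ⟨x, y⟩ := a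
      simp only [gcount, if_pos hk]
      simp only at hle h hk
      omega

-- ===== VERDICT (by name: the statement is the Claim_ definition above) =====
theorem solution_spec : Claim_equal_solution := by
  intro k dungeons _
  unfold Spec_solution solution solution_alt
  have hrw : ∀ p : List (Int × Int),
      (p.foldl (fun tc xy => if tc.2 ≥ xy.1 then (tc.1 + 1, tc.2 - xy.2) else tc)
        ((0 : Int), k)).1 = gcount k p := by
    intro p; rw [gfold]; ring
  simp only [hrw]
  apply le_antisymm
  · rcases foldl_max_cases (fun p : List (Int × Int) => gcount k p)
      dungeons.permutations (-1) with h | ⟨p, hp, h⟩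
    · rw [h]
      have := best_nonneg k dungeons
      omega
    · rw [h]
      exact gcount_le_best p.length p le_rfl k dungeons ((List.mem_permutations).1 hp)
  · obtain ⟨p, hperm, hle⟩ := exists_perm_best dungeons.length dungeons le_rfl k
    have hm := foldl_max_le_of_mem (fun p : List (Int × Int) => gcount k p)
      dungeons.permutations (-1) p ((List.mem_permutations).2 hperm)
    exact le_trans hle hm
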